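-- pv_equiv track=rewrite | github.com/criticalhitx/PythonAutomation | 03/getNetAdd.py | getBroadcastAddAry
-- ===== SOURCE A (Python) =====
-- def getBroadcastAddAry(IPary,mask):
--     outputArr=[]
--     if(mask<=8):
--         hostbit=8-mask
--         multiplier=2**hostbit
--         count=0
--         while(IPary[0]-count>=multiplier):
--             count+=multiplier
--         IPary[0]=count+multiplier-1
--         IPary[1]=0
--         IPary[2]=0
--         IPary[3]=0
--         return IPary
--     elif(mask<=16):
--         hostbit=16-mask
--         multiplier=2**hostbit
--         count=0
--         while(IPary[1]-count>=multiplier):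
--             count+=multiplier
--         IPary[1]=count+multiplier-1
--         IPary[2]=0
--         IPary[3]=0
--         return IPary
--     elif(mask<=24):
--         hostbit=24-mask
--         multiplier=2**hostbit
--         count=0
--         while(IPary[2]-count>=multiplier):
--             count+=multiplier
--         IPary[2]=count+multiplier-1
--         IPary[3]=0
--         return IPary
--     else:
--         hostbit=32-mask
--         multiplier=2**hostbit
--         count=0
--         while(IPary[3]-count>=multiplier):
--             count+=multiplier
--         IPary[3]=count+multiplier-1
--         return IPary
-- ===== SOURCE B (Python) =====
-- def getBroadcastAddAry(IPary, mask):
--     # closed form: pick the octet the mask ends in, fill its host bits, zero the rest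
--     idx = min(max((mask - 1) // 8, 0), 3)
--     multiplier = 2 ** ((idx + 1) * 8 - mask)
--     IPary[idx] = IPary[idx] // multiplier * multiplier + multiplier - 1
--     for j in range(idx + 1, 4):
--         IPary[j] = 0
--     return IPary
-- ===== Notes on version B (the rewrite author's own statement) =====
-- stated objective: simpler
-- what changed: Replaces the four-way if/elif cascade and the per-octet counting while-loop by computing the target octet index in closed form (min(max((mask-1)//8,0),3)) and setting that octet with a single floor-division formula, zeroing the following octets in one small loop; Pre_ excludes mask > 32 (A returns a float), lists shorter than 4 (A raises IndexError), and malformed IPs whose target octet is negative, where A's counting loop accidentally treats the octet as 0.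
-- outside the precondition, e.g. on getBroadcastAddAry([-5, 0, 0, 0], 8): A returns [0, 0, 0, 0], B returns [-5, 0, 0, 0]; on getBroadcastAddAry([1, 2, 3, 4], 33): A returns [1, 2, 3, 3.5], B returns [1, 2, 3, 3.5]
import Mathlib
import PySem

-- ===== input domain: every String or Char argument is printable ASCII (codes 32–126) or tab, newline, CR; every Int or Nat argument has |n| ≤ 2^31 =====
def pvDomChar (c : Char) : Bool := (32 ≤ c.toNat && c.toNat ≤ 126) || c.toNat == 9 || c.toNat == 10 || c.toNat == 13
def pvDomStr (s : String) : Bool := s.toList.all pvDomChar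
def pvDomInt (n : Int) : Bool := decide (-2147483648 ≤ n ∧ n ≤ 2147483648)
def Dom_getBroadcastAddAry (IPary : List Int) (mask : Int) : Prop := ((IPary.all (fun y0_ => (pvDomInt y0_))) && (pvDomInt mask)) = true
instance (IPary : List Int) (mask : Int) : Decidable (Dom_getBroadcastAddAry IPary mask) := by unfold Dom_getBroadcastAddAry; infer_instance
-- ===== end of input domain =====

-- B replaces A's if/elif cascade and counting while-loop by a closed-form octet index and a
-- floor-division formula (objective: simpler). Both A and B mutate IPary in place in Python;
-- the equivalence proved here is about the returned list (which is that same mutated list).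

-- ===== PORT A =====
-- the 'while IPary[i]-count >= multiplier: count += multiplier' loop of A
-- (the '0 < m' conjunct only makes the recursion total; in A, m = 2**hostbit > 0 always)
def pvCountLoop (x m count : Int) : Int :=
  if h : 0 < m ∧ m ≤ x - count then pvCountLoop x m (count + m) else count
termination_by (x - count).toNat
decreasing_by omega

def getBroadcastAddAry (IPary : List Int) (mask : Int) : List Int :=
  if mask ≤ 8 then
    let hostbit := 8 - mask
    let multiplier : Int := 2 ^ hostbit.toNat   -- exact: hostbit ≥ 0 in this branch
    let count := pvCountLoop (IPary.getD 0 0) multiplier 0   -- IPary[0]; Pre_ gives length ≥ 4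
    (((IPary.set 0 (count + multiplier - 1)).set 1 0).set 2 0).set 3 0
  else if mask ≤ 16 then
    let hostbit := 16 - mask
    let multiplier : Int := 2 ^ hostbit.toNat
    let count := pvCountLoop (IPary.getD 1 0) multiplier 0
    ((IPary.set 1 (count + multiplier - 1)).set 2 0).set 3 0
  else if mask ≤ 24 then
    let hostbit := 24 - mask
    let multiplier : Int := 2 ^ hostbit.toNat
    let count := pvCountLoop (IPary.getD 2 0) multiplier 0
    (IPary.set 2 (count + multiplier - 1)).set 3 0
  else
    let hostbit := 32 - mask
    let multiplier : Int := 2 ^ hostbit.toNat   -- exact for mask ≤ 32 (Pre_); Python gives a float for mask > 32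
    let count := pvCountLoop (IPary.getD 3 0) multiplier 0
    IPary.set 3 (count + multiplier - 1)

-- ===== PORT B =====
def getBroadcastAddAry_alt (IPary : List Int) (mask : Int) : List Int :=
  let idx : Int := min (max (PySem.Int.floordiv (mask - 1) 8) 0) 3
  let multiplier : Int := 2 ^ ((idx + 1) * 8 - mask).toNat   -- exact: exponent ≥ 0 for mask ≤ 32 (Pre_)
  let x := IPary.getD idx.toNat 0
  let l1 := IPary.set idx.toNat (PySem.Int.floordiv x multiplier * multiplier + multiplier - 1)
  (PySem.List.pyRange (idx + 1) 4 1).foldl (fun l j => l.set j.toNat 0) l1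

-- ===== PRECONDITION & SPEC =====
-- Pre_ excludes mask > 32 (Python's 2**negative is a float, so A's result is not a list of ints),
-- lists shorter than 4 (A raises IndexError), and malformed IPs whose target octet is negative
-- (IP octets are 0–255; there A's counting loop accidentally treats the octet as 0).
def Pre_getBroadcastAddAry (IPary : List Int) (mask : Int) : Prop :=
  mask ≤ 32 ∧ 4 ≤ IPary.length ∧
  0 ≤ IPary.getD (min (max (PySem.Int.floordiv (mask - 1) 8) 0) 3).toNat 0
instance (IPary : List Int) (mask : Int) : Decidable (Pre_getBroadcastAddAry IPary mask) := by unfold Pre_getBroadcastAddAry; infer_instance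
def pvWitness_getBroadcastAddAry : List Int × Int := ([192, 168, 1, 5], 24)

def Spec_getBroadcastAddAry (IPary : List Int) (mask : Int) (out : List Int) : Prop := out = getBroadcastAddAry_alt IPary mask
instance (IPary : List Int) (mask : Int) (out : List Int) : Decidable (Spec_getBroadcastAddAry IPary mask out) := by unfold Spec_getBroadcastAddAry; infer_instance

-- ===== CLAIM (what is proved, stated in full; the proofs are below) =====
def Claim_equal_getBroadcastAddAry : Prop := ∀ (IPary : List Int) (mask : Int), Dom_getBroadcastAddAry IPary mask → Pre_getBroadcastAddAry IPary mask → Spec_getBroadcastAddAry IPary mask (getBroadcastAddAry IPary mask)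

-- ===== LEMMAS AND PROOFS =====

-- A's counting loop is the largest nonnegative multiple of m not exceeding x - c, shifted by c
theorem pvCountLoop_eq (x m c : Int) (hm : 0 < m) :
    pvCountLoop x m c = c + max ((x - c) / m) 0 * m := by
  rw [pvCountLoop]
  split
  case isTrue h =>
    rw [pvCountLoop_eq x m (c + m) hm]
    have h1 : 1 ≤ (x - c) / m := by
      rw [Int.le_ediv_iff_mul_le hm]; omega
    have h2 : (x - (c + m)) / m = (x - c) / m - 1 := by
      have := Int.add_mul_ediv_right (x - c) (-1) (by omega : m ≠ 0)
      have e : x - (c + m) = x - c + -1 * m := by ring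
      rw [e, this]; ring
    rw [h2]
    have : max ((x - c) / m - 1) 0 = (x - c) / m - 1 := by omega
    rw [this]
    have : max ((x - c) / m) 0 = (x - c) / m := by omega
    rw [this]; ring
  case isFalse h =>
    have h1 : (x - c) / m ≤ 0 := by
      by_contra hc
      push_neg at hc
      have : 1 ≤ (x - c) / m := by omega
      rw [Int.le_ediv_iff_mul_le hm] at this
      omega
    have : max ((x - c) / m) 0 = 0 := by omega
    rw [this]; ring
termination_by (x - c).toNat
decreasing_by omega

theorem pvSetVal_eq (x m : Int) (hm : 0 < m) (hx : 0 ≤ x) :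
    pvCountLoop x m 0 + m - 1 = PySem.Int.floordiv x m * m + m - 1 := by
  rw [pvCountLoop_eq x m 0 hm, PySem.Int.floordiv_eq_ediv_of_pos hm]
  have e : x - 0 = x := by ring
  rw [e]
  have h0 : 0 ≤ x / m := Int.ediv_nonneg hx (by omega)
  rw [max_eq_left h0]
  ring

-- ===== VERDICT (by name: the statement is the Claim_ definition above) =====
theorem getBroadcastAddAry_spec : Claim_equal_getBroadcastAddAry := by
  intro IPary mask _ hpre
  obtain ⟨hm32, hlen, hoct⟩ := hpre
  unfold Spec_getBroadcastAddAry getBroadcastAddAry getBroadcastAddAry_alt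
  have hfd : PySem.Int.floordiv (mask - 1) 8 = (mask - 1) / 8 :=
    PySem.Int.floordiv_eq_ediv_of_pos (by omega)
  by_cases h8 : mask ≤ 8
  · have hidx : min (max (PySem.Int.floordiv (mask - 1) 8) 0) 3 = 0 := by rw [hfd]; omega
    rw [hidx] at hoct
    have hoct' : 0 ≤ IPary.getD 0 0 := hoct
    simp only [hidx, h8, if_true]
    have hr : PySem.List.pyRange ((0 : Int) + 1) 4 1 = [1, 2, 3] := by decide
    rw [hr]
    simp only [List.foldl]
    rw [pvSetVal_eq _ _ (pow_pos (by norm_num) _) hoct']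
    norm_num [show Int.toNat 2 = 2 from rfl, show Int.toNat 3 = 3 from rfl]
  · by_cases h16 : mask ≤ 16
    · have hidx : min (max (PySem.Int.floordiv (mask - 1) 8) 0) 3 = 1 := by rw [hfd]; omega
      rw [hidx] at hoct
      have hoct' : 0 ≤ IPary.getD 1 0 := hoct
      simp only [hidx, h8, h16, if_false, if_true]
      have hr : PySem.List.pyRange ((1 : Int) + 1) 4 1 = [2, 3] := by decide
      rw [hr]
      simp only [List.foldl]
      rw [pvSetVal_eq _ _ (pow_pos (by norm_num) _) hoct']
      norm_num [show Int.toNat 2 = 2 from rfl, show Int.toNat 3 = 3 from rfl]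
    · by_cases h24 : mask ≤ 24
      · have hidx : min (max (PySem.Int.floordiv (mask - 1) 8) 0) 3 = 2 := by rw [hfd]; omega
        rw [hidx] at hoct
        have hoct' : 0 ≤ IPary.getD 2 0 := hoct
        simp only [hidx, h8, h16, h24, if_false, if_true]
        have hr : PySem.List.pyRange ((2 : Int) + 1) 4 1 = [3] := by decide
        rw [hr]
        simp only [List.foldl]
        rw [pvSetVal_eq _ _ (pow_pos (by norm_num) _) hoct']
        norm_num [show Int.toNat 2 = 2 from rfl, show Int.toNat 3 = 3 from rfl]
      · have hidx : min (max (PySem.Int.floordiv (mask - 1) 8) 0) 3 = 3 := by rw [hfd]; omega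
        rw [hidx] at hoct
        have hoct' : 0 ≤ IPary.getD 3 0 := hoct
        simp only [hidx, h8, h16, h24, if_false]
        have hr : PySem.List.pyRange ((3 : Int) + 1) 4 1 = [] := by decide
        rw [hr]
        simp only [List.foldl]
        rw [pvSetVal_eq _ _ (pow_pos (by norm_num) _) hoct']
        norm_num [show Int.toNat 2 = 2 from rfl, show Int.toNat 3 = 3 from rfl]
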